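-- pv_equiv track=rewrite | github.com/jxie0755/Learning_Python | ZZProject/EightQueens/eight_queens.py | cross_coor_1
-- ===== SOURCE A (Python) =====
-- def cross_coor_1(coor): # of \ cross
--     """output a list of cross of coor in the direction of /"""
--     x, y = coor[0], coor[1]
--     cross_coor_list = [coor]
--     before, after = coor[:], coor[:]
--     while before[0] > 1 and before[1] < 8:
--         x, y = before[0], before[1]
--         before = (x-1, y+1)
--         cross_coor_list = [before] + cross_coor_list
--
--     while after[0] < 8 and after[1] > 1:
--         x, y = after[0], after[1]
--         after = (x+1, y-1)
--         cross_coor_list = cross_coor_list + [after]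
--
--     return cross_coor_list
-- ===== SOURCE B (Python) =====
-- def cross_coor_1(coor):
--     """output a list of cross of coor in the direction of /"""
--     x, y = coor[0], coor[1]
--     s = x + y
--     lo = x - max(0, min(x - 1, 8 - y))
--     hi = x + max(0, min(8 - x, y - 1))
--     return [coor if i == x else (i, s - i) for i in range(lo, hi + 1)]
-- ===== Notes on version B (the rewrite author's own statement) =====
-- stated objective: simpler
-- what changed: Replaced the two outward-walking while loops (prepend up-left, append down-right) by a closed-form clipped range [lo, hi] on the constant anti-diagonal sum s = x + y and a single list comprehension over it.
import Mathlib
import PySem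

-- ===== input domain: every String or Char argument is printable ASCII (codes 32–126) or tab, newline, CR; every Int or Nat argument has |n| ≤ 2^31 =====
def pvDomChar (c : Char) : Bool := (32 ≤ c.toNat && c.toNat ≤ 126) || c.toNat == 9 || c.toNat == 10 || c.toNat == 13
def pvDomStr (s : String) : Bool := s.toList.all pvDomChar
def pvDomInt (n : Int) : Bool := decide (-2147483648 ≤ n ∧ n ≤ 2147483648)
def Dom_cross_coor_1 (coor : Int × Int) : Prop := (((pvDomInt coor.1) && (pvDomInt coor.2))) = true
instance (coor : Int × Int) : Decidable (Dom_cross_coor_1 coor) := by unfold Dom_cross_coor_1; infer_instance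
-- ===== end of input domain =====

-- B replaces A's two outward-walking while loops by a closed-form clipped range and a single
-- comprehension over it (objective: simpler; same ascending anti-diagonal).

-- ===== PORT A =====
-- first while loop: walk up-left, prepending
def cc1_loop1 (x y : Int) (acc : List (Int × Int)) : List (Int × Int) :=
  if x > 1 ∧ y < 8 then cc1_loop1 (x - 1) (y + 1) ((x - 1, y + 1) :: acc) else acc
termination_by (x - 1).toNat
decreasing_by omega

-- second while loop: walk down-right, appending
def cc1_loop2 (x y : Int) (acc : List (Int × Int)) : List (Int × Int) :=
  if x < 8 ∧ y > 1 then cc1_loop2 (x + 1) (y - 1) (acc ++ [(x + 1, y - 1)]) else acc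
termination_by (8 - x).toNat
decreasing_by omega

def cross_coor_1 (coor : Int × Int) : List (Int × Int) :=
  cc1_loop2 coor.1 coor.2 (cc1_loop1 coor.1 coor.2 [coor])

-- ===== PORT B =====
def cross_coor_1_alt (coor : Int × Int) : List (Int × Int) :=
  let x := coor.1
  let y := coor.2
  let s := x + y
  let lo := x - max 0 (min (x - 1) (8 - y))
  let hi := x + max 0 (min (8 - x) (y - 1))
  (PySem.List.pyRange lo (hi + 1) 1).map (fun i => if i == x then coor else (i, s - i))

-- ===== PRECONDITION & SPEC =====
def Spec_cross_coor_1 (coor : Int × Int) (out : List (Int × Int)) : Prop := out = cross_coor_1_alt coor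
instance (coor : Int × Int) (out : List (Int × Int)) : Decidable (Spec_cross_coor_1 coor out) := by unfold Spec_cross_coor_1; infer_instance

-- ===== CLAIM (what is proved, stated in full; the proofs are below) =====
def Claim_equal_cross_coor_1 : Prop := ∀ (coor : Int × Int), Dom_cross_coor_1 coor → Spec_cross_coor_1 coor (cross_coor_1 coor)

-- ===== LEMMAS AND PROOFS =====

-- the first loop prepends exactly the anti-diagonal points from lo up to x-1
theorem cc1_loop1_eq (x y : Int) (acc : List (Int × Int)) :
    cc1_loop1 x y acc =
      (PySem.List.pyRange (x - max 0 (min (x - 1) (8 - y))) x 1).map (fun i => (i, x + y - i)) ++ acc := by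
  induction x, y, acc using cc1_loop1.induct with
  | case1 x y acc h ih =>
    rw [cc1_loop1, if_pos h, ih]
    have h1 : x - max 0 (min (x - 1) (8 - y)) ≤ x - 1 := by omega
    have h2 : (x - 1) - max 0 (min (x - 1 - 1) (8 - (y + 1))) = x - max 0 (min (x - 1) (8 - y)) := by
      omega
    rw [h2, show (PySem.List.pyRange (x - max 0 (min (x - 1) (8 - y))) x 1) =
        (PySem.List.pyRange (x - max 0 (min (x - 1) (8 - y))) (x - 1) 1) ++ [x - 1] from by
      have := PySem.List.pyRange_one_succ_right (a := x - max 0 (min (x - 1) (8 - y))) (b := x - 1) h1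
      simpa using this]
    simp
  | case2 x y acc h =>
    rw [cc1_loop1, if_neg h]
    have : x - max 0 (min (x - 1) (8 - y)) = x := by omega
    rw [this, PySem.List.pyRange_one_eq_nil (by omega)]
    simp

-- the second loop appends exactly the anti-diagonal points from x+1 up to hi
theorem cc1_loop2_eq (x y : Int) (acc : List (Int × Int)) :
    cc1_loop2 x y acc =
      acc ++ (PySem.List.pyRange (x + 1) (x + max 0 (min (8 - x) (y - 1)) + 1) 1).map (fun i => (i, x + y - i)) := by
  induction x, y, acc using cc1_loop2.induct with
  | case1 x y acc h ih =>
    rw [cc1_loop2, if_pos h, ih]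
    have h2 : (x + 1) + max 0 (min (8 - (x + 1)) (y - 1 - 1)) + 1 = x + max 0 (min (8 - x) (y - 1)) + 1 := by
      omega
    rw [h2, show (PySem.List.pyRange (x + 1) (x + max 0 (min (8 - x) (y - 1)) + 1) 1) =
        (x + 1) :: PySem.List.pyRange (x + 1 + 1) (x + max 0 (min (8 - x) (y - 1)) + 1) 1 from by
      have := PySem.List.pyRange_one_cons (a := x + 1) (b := x + max 0 (min (8 - x) (y - 1)) + 1) (by omega)
      simpa using this]
    simp
  | case2 x y acc h =>
    rw [cc1_loop2, if_neg h]
    rw [show x + max 0 (min (8 - x) (y - 1)) + 1 = x + 1 from by omega,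
      PySem.List.pyRange_one_eq_nil (by omega)]
    simp

-- ===== VERDICT (by name: the statement is the Claim_ definition above) =====
theorem cross_coor_1_spec : Claim_equal_cross_coor_1 := by
  intro coor _
  obtain ⟨x, y⟩ := coor
  unfold Spec_cross_coor_1 cross_coor_1 cross_coor_1_alt
  simp only
  rw [cc1_loop1_eq, cc1_loop2_eq]
  -- the if-branch never matters: at i = x the tuple equals (x, y) itself
  have hg : ∀ i : Int, (if i == x then ((x, y) : Int × Int) else (i, x + y - i)) = (i, x + y - i) := by
    intro i
    by_cases h : i = x
    · subst h; simp
    · simp [h]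
  rw [List.map_congr_left (fun i _ => hg i)]
  rw [PySem.List.pyRange_one_append (a := x - max 0 (min (x - 1) (8 - y))) (m := x)
    (b := x + max 0 (min (8 - x) (y - 1)) + 1) (by omega) (by omega),
    PySem.List.pyRange_one_cons (a := x) (b := x + max 0 (min (8 - x) (y - 1)) + 1) (by omega)]
  simp
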